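-- pv_equiv track=rewrite | github.com/burnsaustin145/MidiMaxGen | midimaxgen/patterns/simple.py | _up_down_pattern
-- ===== SOURCE A (Python) =====
-- from typing import List, Any, Optional, Callable
--
-- def _up_down_pattern(notes: List[Any], count: int) -> List[Any]:
--     """
--     Generate ping-pong (up-down) arpeggio pattern.
--
--     Notes go up to the top, then back down, without repeating
--     the top or bottom notes at the turnaround points.
--
--     For a 3-note chord [C, E, G], the cycle is: C-E-G-E-C-E-G-E...
--     (4 notes per cycle = 2 * len - 2)
--
--     Args:
--         notes: List of notes to arpeggiate
--         count: Number of notes to generate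
--
--     Returns:
--         List of notes in up-down pattern
--     """
--     if not notes:
--         return []
--     if len(notes) == 1:
--         return [notes[0]] * count
--
--     # Create one full cycle: up then down (without repeating endpoints)
--     # For [C, E, G]: cycle = [C, E, G, E] (length = 2*3 - 2 = 4)
--     cycle_length = 2 * len(notes) - 2
--
--     result = []
--     for i in range(count):
--         pos = i % cycle_length
--         if pos < len(notes):
--             # Going up
--             result.append(notes[pos])
--         else:
--             # Going down (mirror position)
--             mirror_pos = cycle_length - pos
--             result.append(notes[mirror_pos])
--
--     return result
-- ===== SOURCE B (Python) =====
-- def _up_down_pattern(notes, count):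
--     if not notes:
--         return []
--     if len(notes) == 1:
--         return notes * count
--     cycle = notes + notes[1:-1][::-1]
--     n = max(count, 0)
--     return (cycle * (n // len(cycle) + 1))[:n]
-- ===== Notes on version B (the rewrite author's own statement) =====
-- stated objective: simpler
-- what changed: A indexes note-by-note with a per-step modulus and an up/down branch; B builds one explicit ping-pong cycle (notes + reversed interior) once and produces the result by tiling the cycle and slicing to length.
import Mathlib
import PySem

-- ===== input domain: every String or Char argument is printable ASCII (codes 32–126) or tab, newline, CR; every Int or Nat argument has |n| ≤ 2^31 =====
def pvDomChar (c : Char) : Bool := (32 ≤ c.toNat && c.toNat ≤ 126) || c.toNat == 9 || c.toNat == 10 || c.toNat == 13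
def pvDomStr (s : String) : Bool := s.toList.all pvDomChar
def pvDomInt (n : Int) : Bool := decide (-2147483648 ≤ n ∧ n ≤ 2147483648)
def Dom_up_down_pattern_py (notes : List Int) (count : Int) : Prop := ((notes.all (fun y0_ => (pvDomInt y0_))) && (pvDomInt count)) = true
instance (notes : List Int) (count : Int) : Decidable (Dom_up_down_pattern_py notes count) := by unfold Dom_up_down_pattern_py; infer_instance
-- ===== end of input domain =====

-- B replaces A's per-step modulus/branch indexing by building one explicit ping-pong cycle and tiling+slicing it (objective: simpler).

-- ===== PORT A =====
def up_down_pattern_py (notes : List Int) (count : Int) : List Int :=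
  if notes = [] then []
  else if notes.length = 1 then
    PySem.List.pyRepeat [PySem.List.pyGetD notes 0 0] count   -- [notes[0]] * count
  else
    let cycleLength : Int := 2 * (notes.length : Int) - 2
    (PySem.List.pyRange 0 count).foldl (fun result i =>
      let pos := PySem.Int.mod i cycleLength
      if pos < (notes.length : Int) then
        result ++ [PySem.List.pyGetD notes pos 0]
      else
        result ++ [PySem.List.pyGetD notes (cycleLength - pos) 0]) []

-- ===== PORT B =====
def up_down_pattern_py_alt (notes : List Int) (count : Int) : List Int :=
  if notes = [] then []
  else if notes.length = 1 then
    PySem.List.pyRepeat notes count                            -- notes * count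
  else
    -- cycle = notes + notes[1:-1][::-1]  ([::-1] is reverse, cf. PySem.List.slice?_none_none_neg_one)
    let cycle := notes ++ (PySem.List.slice notes (some 1) (some (-1))).reverse
    let n := max count 0
    PySem.List.slice (PySem.List.pyRepeat cycle (PySem.Int.floordiv n (cycle.length : Int) + 1)) none (some n)

-- ===== PRECONDITION & SPEC =====
def Spec_up_down_pattern_py (notes : List Int) (count : Int) (out : List Int) : Prop := out = up_down_pattern_py_alt notes count
instance (notes : List Int) (count : Int) (out : List Int) : Decidable (Spec_up_down_pattern_py notes count out) := by unfold Spec_up_down_pattern_py; infer_instance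

-- ===== CLAIM (what is proved, stated in full; the proofs are below) =====
def Claim_equal_up_down_pattern_py : Prop := ∀ (notes : List Int) (count : Int), Dom_up_down_pattern_py notes count → Spec_up_down_pattern_py notes count (up_down_pattern_py notes count)

-- ===== LEMMAS AND PROOFS =====

-- take n of xs is the map of getD over range n, for n within xs
lemma map_getD_range_take (xs : List Int) (n : Nat) (h : n ≤ xs.length) :
    (List.range n).map (fun k => xs.getD k 0) = xs.take n := by
  apply List.ext_getElem
  · simp [h]
  · intro i h1 h2
    simp at h1
    simp [List.getElem?_eq_getElem (by omega : i < xs.length)]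

-- the core of B: a tiled cycle cut to length n reads cyclically
lemma take_flatten_replicate (xs : List Int) (hx : 0 < xs.length) :
    ∀ (m n : Nat), n ≤ m * xs.length →
      (List.replicate m xs).flatten.take n
        = (List.range n).map (fun k => xs.getD (k % xs.length) 0) := by
  intro m
  induction m with
  | zero => intro n hn; simp at hn; simp [hn]
  | succ m ih =>
    intro n hn
    rw [List.replicate_succ, List.flatten_cons]
    by_cases hle : n ≤ xs.length
    · rw [List.take_append_of_le_length hle]
      have : ∀ k ∈ List.range n, xs.getD (k % xs.length) 0 = xs.getD k 0 := by
        intro k hk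
        simp at hk
        rw [Nat.mod_eq_of_lt (by omega)]
      rw [List.map_congr_left this, map_getD_range_take xs n hle]
    · push_neg at hle
      have hr : List.range n
          = List.range xs.length ++ List.map (fun x => xs.length + x) (List.range (n - xs.length)) := by
        conv_lhs => rw [show n = xs.length + (n - xs.length) by omega]
        exact List.range_add
      rw [List.take_append, List.take_of_length_le (le_of_lt hle), hr, List.map_append]
      congr 1
      · have : ∀ k ∈ List.range xs.length, xs.getD (k % xs.length) 0 = xs.getD k 0 := by
          intro k hk
          simp at hk
          rw [Nat.mod_eq_of_lt hk]
        rw [List.map_congr_left this, map_getD_range_take xs xs.length le_rfl, List.take_length]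
      · have hmle : n - xs.length ≤ m * xs.length := by
          have hmul : (m + 1) * xs.length = m * xs.length + xs.length := by ring
          omega
        rw [ih (n - xs.length) hmle, List.map_map]
        apply List.map_congr_left
        intro k hk
        simp [Nat.add_mod_left]

-- notes[1:-1] is the interior of the list
lemma slice_interior (notes : List Int) (h2 : 2 ≤ notes.length) :
    PySem.List.slice notes (some 1) (some (-1))
      = List.take (notes.length - 2) (List.drop 1 notes) := by
  have ha : PySem.List.clampIdx notes.length 1 = 1 := by
    unfold PySem.List.clampIdx
    rw [if_neg (by norm_num : ¬((1:Int) < 0))]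
    omega
  have hb : PySem.List.clampIdx notes.length (-1) = notes.length - 1 := by
    unfold PySem.List.clampIdx
    rw [if_pos (by norm_num : ((-1:Int) < 0)), if_neg (by omega : ¬((notes.length:Int) + -1 < 0))]
    omega
  simp only [PySem.List.slice, ha, hb]
  congr 1

-- the cycle's length
lemma cycle_length (notes : List Int) (h2 : 2 ≤ notes.length) :
    (notes ++ (PySem.List.slice notes (some 1) (some (-1))).reverse).length
      = 2 * notes.length - 2 := by
  rw [slice_interior notes h2]
  simp
  omega

-- reading the cycle at position j < 2*len-2: up part, then mirrored part
lemma cycle_getD (notes : List Int) (h2 : 2 ≤ notes.length) (j : Nat)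
    (hj : j < 2 * notes.length - 2) :
    (notes ++ (PySem.List.slice notes (some 1) (some (-1))).reverse).getD j 0
      = if j < notes.length then notes.getD j 0
        else notes.getD (2 * notes.length - 2 - j) 0 := by
  have hs := slice_interior notes h2
  rw [List.getD_eq_getElem?_getD]
  by_cases hup : j < notes.length
  · rw [List.getElem?_append_left hup, if_pos hup, List.getD_eq_getElem?_getD]
  · push_neg at hup
    rw [if_neg (by omega), List.getElem?_append_right hup, hs]
    have hlen2 : (List.take (notes.length - 2) (List.drop 1 notes)).length
        = notes.length - 2 := by
      simp
      omega
    rw [List.getElem?_reverse (by rw [hlen2]; omega), hlen2,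
        List.getElem?_take, if_pos (by omega), List.getElem?_drop,
        List.getD_eq_getElem?_getD]
    congr 2
    omega

lemma length_flatten_replicate (m : Nat) (xs : List Int) :
    (List.replicate m xs).flatten.length = m * xs.length := by
  induction m with
  | zero => simp
  | succ m ih => rw [List.replicate_succ, List.flatten_cons, List.length_append, ih]; ring

-- B's tile-and-slice equals the cyclic read-out
lemma alt_eq_cyclic (cycle : List Int) (hc : 0 < cycle.length) (count : Int) :
    PySem.List.slice
        (PySem.List.pyRepeat cycle (PySem.Int.floordiv (max count 0) (cycle.length : Int) + 1))
        none (some (max count 0))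
      = (List.range count.toNat).map (fun k => cycle.getD (k % cycle.length) 0) := by
  have hmax : max count 0 = ((count.toNat : Nat) : Int) := (Int.ofNat_toNat count).symm
  have hfd : PySem.Int.floordiv ((count.toNat : Nat) : Int) (cycle.length : Int) + 1
      = ((count.toNat / cycle.length + 1 : Nat) : Int) := by
    rw [PySem.Int.floordiv_natCast]
    push_cast
    ring
  rw [hmax, hfd]
  have hrep : PySem.List.pyRepeat cycle ((count.toNat / cycle.length + 1 : Nat) : Int)
      = (List.replicate (count.toNat / cycle.length + 1) cycle).flatten := by
    simp only [PySem.List.pyRepeat, Int.toNat_natCast]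
  rw [hrep]
  have htot : (List.replicate (count.toNat / cycle.length + 1) cycle).flatten.length
      = (count.toNat / cycle.length + 1) * cycle.length := length_flatten_replicate _ _
  have hle : count.toNat ≤ (count.toNat / cycle.length + 1) * cycle.length := by
    refine le_of_lt ?_
    have h1 := Nat.div_add_mod count.toNat cycle.length
    have h2 := Nat.mod_lt count.toNat hc
    calc count.toNat
        = cycle.length * (count.toNat / cycle.length) + count.toNat % cycle.length := h1.symm
      _ < cycle.length * (count.toNat / cycle.length) + cycle.length := by omega
      _ = (count.toNat / cycle.length + 1) * cycle.length := by ring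
  have hslice : PySem.List.slice
        (List.replicate (count.toNat / cycle.length + 1) cycle).flatten
        none (some ((count.toNat : Nat) : Int))
      = (List.replicate (count.toNat / cycle.length + 1) cycle).flatten.take count.toNat := by
    simp only [PySem.List.slice, PySem.List.clampIdx_natCast, htot]
    rw [Nat.min_eq_left hle]
    simp
  rw [hslice, take_flatten_replicate cycle hc _ _ hle]

-- ===== VERDICT (by name: the statement is the Claim_ definition above) =====
theorem up_down_pattern_py_spec : Claim_equal_up_down_pattern_py := by
  intro notes count _
  unfold Spec_up_down_pattern_py
  by_cases h0 : notes = []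
  · simp [up_down_pattern_py, up_down_pattern_py_alt, h0]
  · by_cases h1 : notes.length = 1
    · obtain ⟨a, rfl⟩ := List.length_eq_one_iff.mp h1
      simp [up_down_pattern_py, up_down_pattern_py_alt, PySem.List.pyGetD_ofNat']
    · have h2 : 2 ≤ notes.length := by
        rcases notes with _ | ⟨x, xs⟩
        · exact absurd rfl h0
        · rcases xs with _ | ⟨y, ys⟩
          · exact absurd rfl h1
          · simp only [List.length_cons]
            omega
      simp only [up_down_pattern_py, up_down_pattern_py_alt]
      rw [if_neg h0, if_neg h0, if_neg h1, if_neg h1]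
      have hclen : (notes ++ (PySem.List.slice notes (some 1) (some (-1))).reverse).length
          = 2 * notes.length - 2 := cycle_length notes h2
      have hc : 0 < (notes ++ (PySem.List.slice notes (some 1) (some (-1))).reverse).length := by
        omega
      rw [alt_eq_cyclic _ hc count]
      -- A side: turn the foldl into a map, then compare pointwise
      have hfun : (fun (result : List Int) (i : Int) =>
            let pos := PySem.Int.mod i (2 * (notes.length : Int) - 2)
            if pos < (notes.length : Int) then
              result ++ [PySem.List.pyGetD notes pos 0]
            else
              result ++ [PySem.List.pyGetD notes (2 * (notes.length : Int) - 2 - pos) 0])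
          = fun (result : List Int) (i : Int) => result ++
              [if PySem.Int.mod i (2 * (notes.length : Int) - 2) < (notes.length : Int) then
                 PySem.List.pyGetD notes (PySem.Int.mod i (2 * (notes.length : Int) - 2)) 0
               else
                 PySem.List.pyGetD notes
                   (2 * (notes.length : Int) - 2
                     - PySem.Int.mod i (2 * (notes.length : Int) - 2)) 0] := by
        funext r i
        by_cases h : PySem.Int.mod i (2 * (notes.length : Int) - 2) < (notes.length : Int) <;>
          simp [h]
      rw [hfun, PySem.List.foldl_append_singleton_eq_map, List.nil_append,
          PySem.List.pyRange_one, List.map_map]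
      simp only [Int.sub_zero]
      apply List.map_congr_left
      intro k hk
      simp only [Function.comp_apply, zero_add]
      have hLpos : (0:Int) < 2 * (notes.length : Int) - 2 := by
        push_cast
        omega
      have hLcast : 2 * (notes.length : Int) - 2 = ((2 * notes.length - 2 : Nat) : Int) := by
        push_cast [Nat.cast_sub (by omega : 2 ≤ 2 * notes.length)]
        ring
      have hmod : PySem.Int.mod (k : Int) (2 * (notes.length : Int) - 2)
          = ((k % (2 * notes.length - 2) : Nat) : Int) := by
        rw [PySem.Int.mod_eq_emod_of_pos hLpos, hLcast]
        exact (Int.natCast_mod k (2 * notes.length - 2)).symm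
      rw [hmod]
      have hjL : k % (2 * notes.length - 2) < 2 * notes.length - 2 :=
        Nat.mod_lt k (by omega)
      rw [hclen, cycle_getD notes h2 _ hjL]
      by_cases hbr : k % (2 * notes.length - 2) < notes.length
      · rw [if_pos (by exact_mod_cast hbr), if_pos hbr, PySem.List.pyGetD_natCast]
      · rw [if_neg (by exact_mod_cast hbr), if_neg hbr]
        have hsub : 2 * (notes.length : Int) - 2 - ((k % (2 * notes.length - 2) : Nat) : Int)
            = ((2 * notes.length - 2 - k % (2 * notes.length - 2) : Nat) : Int) := by
          rw [hLcast]
          push_cast [Nat.cast_sub (le_of_lt hjL)]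
          ring
        rw [hsub, PySem.List.pyGetD_natCast]
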